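-- pv_equiv track=rewrite | github.com/Aedwon/isfe-discord-bot | utils/challonge_client.py | find_participant_by_name
-- ===== SOURCE A (Python) =====
-- from typing import Optional, Tuple, List, Dict, Any
--
-- def find_participant_by_name(cache: Dict[int, str], search: str) -> Optional[Tuple[int, str]]:
--     """Find participant by partial name match (case-insensitive)."""
--     search_lower = search.lower().strip()
--
--     # Exact match first
--     for pid, name in cache.items():
--         if name.lower() == search_lower:
--             return pid, name
--
--     # Partial match
--     for pid, name in cache.items():
--         if search_lower in name.lower():
--             return pid, name
--
--     return None
-- ===== SOURCE B (Python) =====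
-- from typing import Optional, Tuple, Dict
--
-- def find_participant_by_name(cache: Dict[int, str], search: str) -> Optional[Tuple[int, str]]:
--     """Find participant by partial name match (case-insensitive), single pass."""
--     search_lower = search.lower().strip()
--     first_partial = None
--     for pid, name in cache.items():
--         nl = name.lower()
--         if nl == search_lower:
--             return pid, name
--         if first_partial is None and search_lower in nl:
--             first_partial = pid, name
--     return first_partial
-- ===== Notes on version B (the rewrite author's own statement) =====
-- stated objective: alternative
-- what changed: Replaced A's two sequential scans (exact pass, then partial pass) by a single pass that returns on an exact match and records-but-keeps-scanning the first partial match in an accumulator.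
import Mathlib
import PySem

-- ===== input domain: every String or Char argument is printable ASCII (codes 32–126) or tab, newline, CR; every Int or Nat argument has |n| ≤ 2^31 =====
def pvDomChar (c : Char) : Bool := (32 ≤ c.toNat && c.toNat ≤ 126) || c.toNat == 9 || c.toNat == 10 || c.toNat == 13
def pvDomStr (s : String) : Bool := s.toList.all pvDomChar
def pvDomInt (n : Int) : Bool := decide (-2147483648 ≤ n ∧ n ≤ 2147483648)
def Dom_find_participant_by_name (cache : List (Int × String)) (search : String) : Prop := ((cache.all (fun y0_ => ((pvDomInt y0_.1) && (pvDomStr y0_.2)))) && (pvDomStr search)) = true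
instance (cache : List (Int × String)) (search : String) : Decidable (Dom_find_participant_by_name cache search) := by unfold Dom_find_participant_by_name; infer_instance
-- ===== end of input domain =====

-- B does the same task in ONE pass (exact match returns immediately, first partial match
-- is recorded in an accumulator) instead of A's two sequential scans; alternative decomposition, same cost.

-- ===== PORT A =====
-- first loop of A: exact match on lowered name
def fpExactLoop (cache : List (Int × String)) (sl : List Char) : Option (Int × String) :=
  match cache with
  | [] => none
  | (pid, name) :: rest =>
      if PySem.Chars.lower name.toList = sl then some (pid, name)
      else fpExactLoop rest sl

-- second loop of A: partial (substring) match
def fpPartialLoop (cache : List (Int × String)) (sl : List Char) : Option (Int × String) :=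
  match cache with
  | [] => none
  | (pid, name) :: rest =>
      if PySem.Chars.isIn sl (PySem.Chars.lower name.toList) then some (pid, name)
      else fpPartialLoop rest sl

def find_participant_by_name (cache : List (Int × String)) (search : String) : Option (Int × String) :=
  let sl := PySem.Chars.strip (PySem.Chars.lower search.toList)
  match fpExactLoop cache sl with
  | some r => some r
  | none => fpPartialLoop cache sl

-- ===== PORT B =====
-- single pass: return on exact match, record the first partial match in `firstPartial`
def fpScan (cache : List (Int × String)) (sl : List Char) (firstPartial : Option (Int × String)) :
    Option (Int × String) :=
  match cache with
  | [] => firstPartial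
  | (pid, name) :: rest =>
      let nl := PySem.Chars.lower name.toList
      if nl = sl then some (pid, name)
      else fpScan rest sl
        (if firstPartial.isNone && PySem.Chars.isIn sl nl then some (pid, name) else firstPartial)

def find_participant_by_name_alt (cache : List (Int × String)) (search : String) : Option (Int × String) :=
  fpScan cache (PySem.Chars.strip (PySem.Chars.lower search.toList)) none

-- ===== PRECONDITION & SPEC =====
def Spec_find_participant_by_name (cache : List (Int × String)) (search : String) (out : Option (Int × String)) : Prop := out = find_participant_by_name_alt cache search
instance (cache : List (Int × String)) (search : String) (out : Option (Int × String)) : Decidable (Spec_find_participant_by_name cache search out) := by unfold Spec_find_participant_by_name; infer_instance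

-- ===== CLAIM (what is proved, stated in full; the proofs are below) =====
def Claim_equal_find_participant_by_name : Prop := ∀ (cache : List (Int × String)) (search : String), Dom_find_participant_by_name cache search → Spec_find_participant_by_name cache search (find_participant_by_name cache search)

-- ===== LEMMAS AND PROOFS =====
-- the scan with accumulator equals: exact result, else the accumulator, else the partial result
theorem fpScan_eq (cache : List (Int × String)) (sl : List Char) (acc : Option (Int × String)) :
    fpScan cache sl acc = (fpExactLoop cache sl).or (acc.or (fpPartialLoop cache sl)) := by
  induction cache generalizing acc with
  | nil => cases acc <;> simp [fpScan, fpExactLoop, fpPartialLoop]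
  | cons hd tl ih =>
      obtain ⟨pid, name⟩ := hd
      by_cases hex : PySem.Chars.lower name.toList = sl
      · simp [fpScan, fpExactLoop, hex]
      · simp only [fpScan, fpExactLoop, fpPartialLoop, hex, if_false, ih]
        cases acc with
        | some a => simp
        | none => by_cases hp : PySem.Chars.isIn sl (PySem.Chars.lower name.toList) <;> simp [hp]

-- ===== VERDICT (by name: the statement is the Claim_ definition above) =====
theorem find_participant_by_name_spec : Claim_equal_find_participant_by_name := by
  intro cache search _
  unfold Spec_find_participant_by_name find_participant_by_name find_participant_by_name_alt
  rw [fpScan_eq]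
  cases h : fpExactLoop cache (PySem.Chars.strip (PySem.Chars.lower search.toList)) <;> simp [h, Option.or]
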